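-- pv_equiv track=rewrite | github.com/thu-coai/AutoCAD | src/tools/highlight.py | extract_span_start_ends
-- ===== SOURCE A (Python) =====
-- def extract_span_start_ends(ids):
--     '''extract span from highlight ids'''
--     if ids == '{}':
--         return []
--     else:
--         ids = [int(i) for i in ids.split(',')]
--         ids = sorted(ids)
--         res = []
--         start = ids[0]
--         span_len = 1
--         for i in range(1, len(ids)):
--             if (ids[i] != ids[i-1] + 1): # new span
--                 res.append([start, start + span_len])
--                 start = ids[i]
--                 span_len = 1
--             else: # consecutive span
--                 span_len += 1
--         res.append([start, start + span_len]) # last span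
--         return res
-- ===== SOURCE B (Python) =====
-- from itertools import groupby
--
--
-- def extract_span_start_ends(ids):
--     '''extract span from highlight ids'''
--     if ids == '{}':
--         return []
--     nums = sorted(int(i) for i in ids.split(','))
--     res = []
--     for _, g in groupby(enumerate(nums), key=lambda p: p[1] - p[0]):
--         grp = [v for _, v in g]
--         res.append([grp[0], grp[0] + len(grp)])
--     return res
-- ===== Notes on version B (the rewrite author's own statement) =====
-- stated objective: idiomatic
-- what changed: Replaced the stateful start/span_len accumulator loop over indices with itertools.groupby over enumerate(nums) keyed by value-index (constant exactly along a consecutive run), mapping each maximal group to [first, first+len(group)].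
import Mathlib
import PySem

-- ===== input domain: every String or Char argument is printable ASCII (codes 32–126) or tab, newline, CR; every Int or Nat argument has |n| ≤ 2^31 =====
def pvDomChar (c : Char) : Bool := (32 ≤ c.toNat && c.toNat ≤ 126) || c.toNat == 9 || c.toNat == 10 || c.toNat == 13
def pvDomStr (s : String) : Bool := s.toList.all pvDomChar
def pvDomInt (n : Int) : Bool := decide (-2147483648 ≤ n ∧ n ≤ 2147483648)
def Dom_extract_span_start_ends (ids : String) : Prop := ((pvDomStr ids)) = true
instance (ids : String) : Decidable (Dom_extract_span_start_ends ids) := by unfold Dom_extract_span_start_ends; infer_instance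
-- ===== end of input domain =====

-- B replaces A's stateful start/span_len accumulator loop with itertools.groupby over
-- enumerate keyed by value−index, mapping each maximal group to [first, first+len] (idiomatic; same cost).

-- ===== PORT A =====
-- A's loop 'for i in range(1, len(ids))' reads exactly ids[i-1] and ids[i]; it is ported as a
-- fold over the list of adjacent pairs nums.zip nums.tail (the pair at step i is (ids[i-1], ids[i])),
-- with the same (res, start, span_len) state and the same branch order; exact since i runs 1..len-1.
def extract_span_start_ends (ids : String) : List (List Int) :=
  if ids = "{}" then []
  else
    let nums0 : List Int := ((PySem.Str.split? ids ",").getD []).map (fun p => (PySem.Int.ofStr? p).getD 0)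
    let nums := PySem.List.sorted nums0 (fun x => x) false
    let start0 : Int := PySem.List.pyGetD nums 0 0
    let st := (nums.zip nums.tail).foldl
      (fun (st : List (List Int) × Int × Int) (pr : Int × Int) =>
        if pr.2 ≠ pr.1 + 1 then (st.1 ++ [[st.2.1, st.2.1 + st.2.2]], pr.2, 1)
        else (st.1, st.2.1, st.2.2 + 1)) ([], start0, 1)
    st.1 ++ [[st.2.1, st.2.1 + st.2.2]]

-- ===== PORT B =====
-- itertools.groupby(enumerate(nums), key = lambda p: p[1]-p[0]): maximal adjacent groups of equal key.
def pvGroupByKey (l : List (Int × Int)) : List (List (Int × Int)) :=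
  match l with
  | [] => []
  | p :: rest =>
      (p :: rest.takeWhile (fun q => q.2 - q.1 == p.2 - p.1)) ::
        pvGroupByKey (rest.dropWhile (fun q => q.2 - q.1 == p.2 - p.1))
termination_by l.length
decreasing_by
  simpa using Nat.lt_succ_of_le (List.length_dropWhile_le _ rest)

def extract_span_start_ends_alt (ids : String) : List (List Int) :=
  if ids = "{}" then []
  else
    let nums := PySem.List.sorted
      (((PySem.Str.split? ids ",").getD []).map (fun p => (PySem.Int.ofStr? p).getD 0))
      (fun x => x) false
    (pvGroupByKey (PySem.List.enumerate nums)).map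
      (fun g => let grp := g.map (fun q => q.2); [grp.headD 0, grp.headD 0 + (grp.length : Int)])

-- ===== PRECONDITION & SPEC =====
-- Pre_ excludes exactly the inputs on which A raises ValueError: some comma-separated part
-- that is not an int literal (there A raises; nothing else can fail, split(',') is never empty).
def Pre_extract_span_start_ends (ids : String) : Prop :=
  ids = "{}" ∨ ∀ p ∈ (PySem.Str.split? ids ",").getD [], (PySem.Int.ofStr? p).isSome = true
instance (ids : String) : Decidable (Pre_extract_span_start_ends ids) := by
  unfold Pre_extract_span_start_ends; infer_instance

def pvWitness_extract_span_start_ends : String := "7,3,4,5,12,13"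

def Spec_extract_span_start_ends (ids : String) (out : List (List Int)) : Prop := out = extract_span_start_ends_alt ids
instance (ids : String) (out : List (List Int)) : Decidable (Spec_extract_span_start_ends ids out) := by unfold Spec_extract_span_start_ends; infer_instance

-- ===== CLAIM (what is proved, stated in full; the proofs are below) =====
def Claim_equal_extract_span_start_ends : Prop := ∀ (ids : String), Dom_extract_span_start_ends ids → Pre_extract_span_start_ends ids → Spec_extract_span_start_ends ids (extract_span_start_ends ids)

-- ===== LEMMAS AND PROOFS =====

-- run measurers: length of the maximal consecutive run continuing x, and the remainder
def pvCLen : Int → List Int → Nat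
  | _, [] => 0
  | x, h :: t => if h = x + 1 then pvCLen h t + 1 else 0

def pvCRest : Int → List Int → List Int
  | _, [] => []
  | x, h :: t => if h = x + 1 then pvCRest h t else h :: t

lemma pvCRest_length_le (x : Int) (l : List Int) : (pvCRest x l).length ≤ l.length := by
  induction l generalizing x with
  | nil => simp [pvCRest]
  | cons h t ih =>
    simp only [pvCRest]
    split_ifs
    · exact le_trans (ih h) (Nat.le_succ _)
    · exact le_refl _

lemma pvCLen_le (x : Int) (l : List Int) : pvCLen x l ≤ l.length := by
  induction l generalizing x with
  | nil => simp [pvCLen]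
  | cons h t ih =>
    simp only [pvCLen]
    split_ifs
    · exact Nat.succ_le_succ (ih h)
    · exact Nat.zero_le _

-- the common intermediate: the spans exactly as A's loop state produces them
def pvSpans : Int → Int → Int → List Int → List (List Int)
  | _, start, len, [] => [[start, start + len]]
  | prev, start, len, h :: t =>
      if h ≠ prev + 1 then [start, start + len] :: pvSpans h h 1 t
      else pvSpans h start (len + 1) t

-- A's fold with any starting accumulator produces res ++ pvSpans
lemma pvFold_eq_spans (l : List Int) : ∀ (prev start len : Int) (res : List (List Int)),
    (let st := ((prev :: l).zip l).foldl
      (fun (st : List (List Int) × Int × Int) (pr : Int × Int) =>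
        if pr.2 ≠ pr.1 + 1 then (st.1 ++ [[st.2.1, st.2.1 + st.2.2]], pr.2, 1)
        else (st.1, st.2.1, st.2.2 + 1)) (res, start, len)
     st.1 ++ [[st.2.1, st.2.1 + st.2.2]]) = res ++ pvSpans prev start len l := by
  induction l with
  | nil => intro prev start len res; simp [pvSpans]
  | cons h t ih =>
    intro prev start len res
    simp only [List.zip_cons_cons, List.foldl_cons, pvSpans]
    by_cases hc : h = prev + 1
    · simp only [hc, ne_eq, not_true_eq_false, if_false]
      exact ih (prev + 1) start (len + 1) res
    · have hne : (h ≠ prev + 1) := hc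
      simp only [hne, ne_eq, not_false_eq_true, ite_true]
      rw [ih h h 1 (res ++ [[start, start + len]])]
      simp [List.append_assoc]

-- pvSpans in terms of the run length / remainder
lemma pvSpans_eq (l : List Int) : ∀ (prev start len : Int),
    pvSpans prev start len l
      = [start, start + len + (pvCLen prev l : Int)] ::
          (match pvCRest prev l with
           | [] => []
           | y :: t => pvSpans y y 1 t) := by
  induction l with
  | nil => intro prev start len; simp [pvSpans, pvCLen, pvCRest]
  | cons h t ih =>
    intro prev start len
    by_cases hc : h = prev + 1
    · subst hc
      simp only [pvSpans, pvCLen, pvCRest, ne_eq, not_true_eq_false, if_false, ite_true]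
      rw [ih (prev + 1) start (len + 1)]
      have harith : start + (len + 1) + (pvCLen (prev + 1) t : Int)
          = start + len + ((pvCLen (prev + 1) t + 1 : Nat) : Int) := by push_cast; ring
      rw [harith]
    · simp [pvSpans, pvCLen, pvCRest, hc]

-- the span list starting at first element x with remainder l (B's chunked shape)
def pvChunks (x : Int) (l : List Int) : List (List Int) :=
  [x, x + 1 + (pvCLen x l : Int)] ::
    (if hne : pvCRest x l = [] then []
     else pvChunks ((pvCRest x l).head hne) ((pvCRest x l).tail))
termination_by l.length
decreasing_by
  have h1 := pvCRest_length_le x l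
  have h2 : (pvCRest x l).length ≠ 0 := by
    simpa [List.length_eq_zero_iff] using hne
  simp only [List.length_tail]
  omega

lemma pvSpans_eq_chunks (x : Int) (l : List Int) : pvSpans x x 1 l = pvChunks x l := by
  induction hn : l.length using Nat.strong_induction_on generalizing x l with
  | _ n ih =>
    rw [pvSpans_eq, pvChunks]
    cases hr : pvCRest x l with
    | nil => simp
    | cons y t =>
      have hlt : t.length < n := by
        have := pvCRest_length_le x l
        rw [hr] at this
        simp at this
        omega
      simp only [List.head_cons, List.tail_cons, reduceDIte, reduceCtorEq]
      rw [ih t.length hlt y t rfl]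

-- takeWhile / dropWhile of the groupby key predicate on an enumerated list
lemma pvTakeWhile_enum (l : List Int) : ∀ (x i : Int),
    (PySem.List.enumerate l (i + 1)).takeWhile (fun q => q.2 - q.1 == x - i)
      = PySem.List.enumerate (l.take (pvCLen x l)) (i + 1) := by
  induction l with
  | nil => intro x i; simp [PySem.List.enumerate_nil, pvCLen]
  | cons h t ih =>
    intro x i
    rw [PySem.List.enumerate_cons]
    by_cases hc : h = x + 1
    · subst hc
      have hpred : ((x + 1 : Int) - (i + 1) == x - i) = true := by
        simp only [beq_iff_eq]; ring
      simp only [List.takeWhile_cons, hpred, if_true, pvCLen]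
      have hkey : (fun q : Int × Int => q.2 - q.1 == (x + 1) - (i + 1)) = (fun q : Int × Int => q.2 - q.1 == x - i) := by
        funext q; congr 1; ring
      have := ih (x + 1) (i + 1)
      rw [hkey] at this
      rw [this]
      simp [PySem.List.enumerate_cons]
    · have hpred : (h - (i + 1) == x - i) = false := by
        simp only [beq_eq_false_iff_ne, ne_eq]
        intro hco; apply hc; linarith
      simp [hpred, pvCLen, hc, PySem.List.enumerate_nil]

lemma pvDropWhile_enum (l : List Int) : ∀ (x i : Int),
    (PySem.List.enumerate l (i + 1)).dropWhile (fun q => q.2 - q.1 == x - i)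
      = PySem.List.enumerate (pvCRest x l) (i + 1 + (pvCLen x l : Int)) := by
  induction l with
  | nil => intro x i; simp [PySem.List.enumerate_nil, pvCRest, pvCLen]
  | cons h t ih =>
    intro x i
    rw [PySem.List.enumerate_cons]
    by_cases hc : h = x + 1
    · subst hc
      have hpred : ((x + 1 : Int) - (i + 1) == x - i) = true := by
        simp only [beq_iff_eq]; ring
      simp only [List.dropWhile_cons, hpred, if_true, pvCRest, pvCLen]
      have hkey : (fun q : Int × Int => q.2 - q.1 == (x + 1) - (i + 1)) = (fun q : Int × Int => q.2 - q.1 == x - i) := by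
        funext q; congr 1; ring
      have := ih (x + 1) (i + 1)
      rw [hkey] at this
      rw [this]
      congr 1
      push_cast
      ring
    · have hpred : (h - (i + 1) == x - i) = false := by
        simp only [beq_eq_false_iff_ne, ne_eq]
        intro hco; apply hc; linarith
      simp only [List.dropWhile_cons, hpred, if_false, pvCRest, pvCLen, hc]
      simp

-- B's grouped-and-summarised value equals pvChunks
lemma pvGroup_eq_chunks (x : Int) (l : List Int) : ∀ (i : Int),
    (pvGroupByKey (PySem.List.enumerate (x :: l) i)).map
        (fun g => let grp := g.map (fun q => q.2); [grp.headD 0, grp.headD 0 + (grp.length : Int)])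
      = pvChunks x l := by
  induction hn : l.length using Nat.strong_induction_on generalizing x l with
  | _ n ih =>
    intro i
    rw [PySem.List.enumerate_cons, pvGroupByKey]
    simp only
    rw [pvTakeWhile_enum l x i, pvDropWhile_enum l x i]
    have hmap : ((i, x) :: PySem.List.enumerate (l.take (pvCLen x l)) (i + 1)).map (fun q : Int × Int => q.2)
        = x :: l.take (pvCLen x l) := by
      simp [PySem.List.map_snd_enumerate]
    have hlen : (l.take (pvCLen x l)).length = pvCLen x l := by
      simp [pvCLen_le x l]
    rw [List.map_cons]
    simp only [hmap]
    rw [pvChunks]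
    cases hr : pvCRest x l with
    | nil =>
      simp only [PySem.List.enumerate_nil, pvGroupByKey, List.map_nil, reduceDIte]
      simp [hlen]
      omega
    | cons y t =>
      have hlt : t.length < n := by
        have := pvCRest_length_le x l
        rw [hr] at this
        simp at this
        omega
      simp only [List.head_cons, List.tail_cons, reduceDIte, reduceCtorEq]
      have hih := ih t.length hlt y t rfl (i + 1 + (pvCLen x l : Int))
      simp only at hih
      rw [hih]
      simp [hlen]
      omega

-- Python's s.split(',') always yields at least one piece
lemma pvSplitOnGo_ne_nil (sep : List Char) : ∀ (fuel : Nat) (l cur : List Char) (acc : List (List Char)),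
    PySem.Chars.splitOn.go sep fuel l cur acc ≠ [] := by
  intro fuel
  induction fuel with
  | zero => intro l cur acc; simp [PySem.Chars.splitOn.go]
  | succ n ih =>
    intro l cur acc
    cases l with
    | nil => simp [PySem.Chars.splitOn.go]
    | cons c rest =>
      rw [PySem.Chars.splitOn.go]
      split_ifs
      · exact ih _ _ _
      · exact ih _ _ _

lemma pvSplit_ne_nil (ids : String) : (PySem.Str.split? ids ",").getD [] ≠ [] := by
  have h : PySem.Chars.split? ids.toList [','] = some (PySem.Chars.splitOn ids.toList [',']) := by
    simp [PySem.Chars.split?]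
  unfold PySem.Str.split?
  have hsep : (",".toList : List Char) = [','] := by decide
  rw [hsep, h]
  simp only [Option.map_some, Option.getD_some, ne_eq, List.map_eq_nil_iff]
  unfold PySem.Chars.splitOn
  exact pvSplitOnGo_ne_nil _ _ _ _ _

-- ===== VERDICT (by name: the statement is the Claim_ definition above) =====
theorem extract_span_start_ends_spec : Claim_equal_extract_span_start_ends := by
  intro ids _ _
  unfold Spec_extract_span_start_ends extract_span_start_ends extract_span_start_ends_alt
  by_cases hb : ids = "{}"
  · simp [hb]
  · simp only [hb, if_false]
    set nums0 : List Int := ((PySem.Str.split? ids ",").getD []).map (fun p => (PySem.Int.ofStr? p).getD 0) with hnums0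
    set nums := PySem.List.sorted nums0 (fun x => x) false with hnums
    have hne : nums ≠ [] := by
      rw [hnums, Ne, PySem.List.sorted_eq_nil_iff, hnums0]
      simp [pvSplit_ne_nil ids]
    obtain ⟨x, l, hxl⟩ := List.exists_cons_of_ne_nil hne
    rw [hxl]
    rw [PySem.List.pyGetD_zero_cons x l 0]
    simp only [List.tail_cons]
    have hA := pvFold_eq_spans l x x 1 []
    simp only [List.nil_append] at hA
    rw [hA]
    rw [pvSpans_eq_chunks x l]
    exact (pvGroup_eq_chunks x l 0).symm
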